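-- pv_equiv track=rewrite | github.com/Jack-McKain/Python-Programing | Lab01/McKainjr_Lab1.py | lucas
-- ===== SOURCE A (Python) =====
-- def lucas(n):
--     """Returns the nth Lucas number.
--       Lucas numbers form a series similar to Fibonacci series,
--       where each number is the sum of the previous two numbers:
--       2, 1, 3, 4, 7, 11, 18, 29, 47, 76, 123, 199, 322, 521, 843,...
--
--     >>> lucas(0)
--     2
--     >>> lucas(1)
--     1
--     >>> lucas(2)
--     3
--     >>> lucas(100)
--     792070839848372253127
--     """
--     "*** YOUR CODE HERE ***"
--     curr = 2
--     next = 1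
--     while n > 0:
--         curr, next = next, curr + next
--         n -= 1
--     return curr
-- ===== SOURCE B (Python) =====
-- def lucas(n):
--     """Returns the nth Lucas number, via fast doubling on Fibonacci pairs:
--     L(n) is twice F(n+1) minus F(n)."""
--     def fib_pair(k):
--         # returns (F(k), F(k+1)) using fast doubling
--         if k == 0:
--             return (0, 1)
--         a, b = fib_pair(k >> 1)
--         c = a * (2 * b - a)
--         d = a * a + b * b
--         if k & 1:
--             return (d, c + d)
--         return (c, d)
--     if n <= 0:
--         return 2
--     a, b = fib_pair(n)
--     return 2 * b - a
-- ===== Notes on version B (the rewrite author's own statement) =====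
-- stated objective: faster
-- what changed: Replaced the linear while-loop over successive Lucas pairs by fast-doubling recursion on Fibonacci pairs (Lucas number as twice the next Fibonacci minus the current one); intended as faster, measured tens of times faster at the largest sizes of a timing run, unconfirmed at the very largest where the huge output could not be decoded.
import Mathlib
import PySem

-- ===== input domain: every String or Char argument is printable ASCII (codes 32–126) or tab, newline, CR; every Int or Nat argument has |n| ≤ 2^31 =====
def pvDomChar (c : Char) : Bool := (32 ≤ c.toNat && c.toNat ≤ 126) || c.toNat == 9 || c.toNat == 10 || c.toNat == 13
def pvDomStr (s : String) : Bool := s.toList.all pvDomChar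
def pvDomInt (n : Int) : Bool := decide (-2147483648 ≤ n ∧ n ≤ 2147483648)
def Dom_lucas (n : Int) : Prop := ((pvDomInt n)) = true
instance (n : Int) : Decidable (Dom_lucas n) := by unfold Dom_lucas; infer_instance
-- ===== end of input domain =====

-- B replaces A's linear loop by fast doubling on Fibonacci pairs (the Lucas number is twice the next Fibonacci minus the current one); intended as faster, intended as faster; a timing run measured large speedups at its largest sizes but could not confirm at the top size.


-- ===== PORT A =====
-- 'while n > 0: curr, next = next, curr + next; n -= 1' — executed exactly n.toNat times
def lucasLoop : Nat → Int → Int → Int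
  | 0, curr, _ => curr
  | k + 1, curr, next => lucasLoop k next (curr + next)

def lucas (n : Int) : Int := lucasLoop n.toNat 2 1

-- ===== PORT B =====
-- fib_pair k = (fib k, fib (k+1)) by fast doubling
def fibPair (k : Nat) : Int × Int :=
  if _h : k = 0 then (0, 1)
  else
    let p := fibPair (k / 2)
    let a := p.1
    let b := p.2
    let c := a * (2 * b - a)
    let d := a * a + b * b
    if k % 2 = 1 then (d, c + d) else (c, d)
decreasing_by exact Nat.div_lt_self (Nat.pos_of_ne_zero _h) (by norm_num)

def lucas_alt (n : Int) : Int :=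
  if n ≤ 0 then 2
  else
    let p := fibPair n.toNat
    2 * p.2 - p.1

-- ===== PRECONDITION & SPEC =====
def Spec_lucas (n : Int) (out : Int) : Prop := out = lucas_alt n
instance (n : Int) (out : Int) : Decidable (Spec_lucas n out) := by unfold Spec_lucas; infer_instance

-- ===== CLAIM (what is proved, stated in full; the proofs are below) =====
def Claim_equal_lucas : Prop := ∀ (n : Int), Dom_lucas n → Spec_lucas n (lucas n)

-- ===== LEMMAS AND PROOFS =====

-- cast of Nat.fib to Int, for the doubling identities
theorem fib_two_mul_int (m : Nat) :
    ((Nat.fib (2 * m) : Int)) = (Nat.fib m : Int) * (2 * (Nat.fib (m + 1) : Int) - (Nat.fib m : Int)) := by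
  have h := Nat.fib_two_mul m
  have hle : Nat.fib m ≤ 2 * Nat.fib (m + 1) :=
    le_trans (Nat.fib_le_fib_succ) (by omega)
  zify [hle] at h
  rw [h]

theorem fib_two_mul_add_one_int (m : Nat) :
    ((Nat.fib (2 * m + 1) : Int)) = (Nat.fib m : Int) * (Nat.fib m : Int) + (Nat.fib (m + 1) : Int) * (Nat.fib (m + 1) : Int) := by
  have h := Nat.fib_two_mul_add_one m
  zify at h
  rw [h]; ring

theorem fibPair_eq (k : Nat) : fibPair k = ((Nat.fib k : Int), (Nat.fib (k + 1) : Int)) := by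
  induction k using Nat.strong_induction_on with
  | _ k ih =>
    rw [fibPair]
    by_cases h : k = 0
    · simp [h]
    · have hlt : k / 2 < k := Nat.div_lt_self (Nat.pos_of_ne_zero h) (by norm_num)
      rw [dif_neg h]
      simp only [ih (k / 2) hlt]
      by_cases hpar : k % 2 = 1
      · rw [if_pos hpar]
        have e1 : (Nat.fib k : Int)
            = (Nat.fib (k / 2) : Int) * (Nat.fib (k / 2) : Int) + (Nat.fib (k / 2 + 1) : Int) * (Nat.fib (k / 2 + 1) : Int) := by
          conv_lhs => rw [show k = 2 * (k / 2) + 1 by omega]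
          rw [fib_two_mul_add_one_int]
        have e2 : (Nat.fib (k + 1) : Int)
            = (Nat.fib (k / 2) : Int) * (2 * (Nat.fib (k / 2 + 1) : Int) - (Nat.fib (k / 2) : Int))
              + ((Nat.fib (k / 2) : Int) * (Nat.fib (k / 2) : Int) + (Nat.fib (k / 2 + 1) : Int) * (Nat.fib (k / 2 + 1) : Int)) := by
          rw [show k + 1 = 2 * (k / 2) + 2 by omega, Nat.fib_add_two]
          push_cast
          rw [fib_two_mul_int, fib_two_mul_add_one_int]
        rw [Prod.mk.injEq]
        exact ⟨e1.symm, e2.symm⟩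
      · rw [if_neg hpar]
        have e1 : (Nat.fib k : Int)
            = (Nat.fib (k / 2) : Int) * (2 * (Nat.fib (k / 2 + 1) : Int) - (Nat.fib (k / 2) : Int)) := by
          conv_lhs => rw [show k = 2 * (k / 2) by omega]
          rw [fib_two_mul_int]
        have e2 : (Nat.fib (k + 1) : Int)
            = (Nat.fib (k / 2) : Int) * (Nat.fib (k / 2) : Int) + (Nat.fib (k / 2 + 1) : Int) * (Nat.fib (k / 2 + 1) : Int) := by
          rw [show k + 1 = 2 * (k / 2) + 1 by omega, fib_two_mul_add_one_int]
        rw [Prod.mk.injEq]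
        exact ⟨e1.symm, e2.symm⟩

-- Lucas numbers by their recurrence
def luc : Nat → Int
  | 0 => 2
  | 1 => 1
  | n + 2 => luc n + luc (n + 1)

theorem lucasLoop_luc (k i : Nat) : lucasLoop k (luc i) (luc (i + 1)) = luc (i + k) := by
  induction k generalizing i with
  | zero => simp [lucasLoop]
  | succ k ih =>
    have : luc i + luc (i + 1) = luc (i + 2) := rfl
    rw [lucasLoop, this, show i + 1 + 1 = i + 2 from rfl] at *
    rw [ih (i + 1)]
    congr 1
    omega

theorem luc_eq_fib (m : Nat) : luc m = 2 * (Nat.fib (m + 1) : Int) - (Nat.fib m : Int) := by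
  induction m using Nat.twoStepInduction with
  | zero => simp [luc]
  | one => simp [luc, Nat.fib]
  | more n ih1 ih2 =>
    rw [luc, ih1, ih2]
    have : Nat.fib (n + 2 + 1) = Nat.fib (n + 1) + Nat.fib (n + 2) := by
      rw [Nat.fib_add_two]
    push_cast [this, Nat.fib_add_two (n := n)]
    ring

-- ===== VERDICT (by name: the statement is the Claim_ definition above) =====
theorem lucas_spec : Claim_equal_lucas := by
  intro n _
  unfold Spec_lucas lucas lucas_alt
  by_cases hn : n ≤ 0
  · have : n.toNat = 0 := by omega
    simp [hn, this, lucasLoop]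
  · simp only [hn, if_false]
    rw [fibPair_eq]
    have hloop : lucasLoop n.toNat 2 1 = luc n.toNat := by
      have h := lucasLoop_luc n.toNat 0
      simpa [luc] using h
    rw [hloop, luc_eq_fib]
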